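-- pv_equiv track=rewrite | github.com/aiulus/perfcba | causal_bandits.py | all_assignments
-- ===== SOURCE A (Python) =====
-- import itertools
-- from typing import (
--     Any,
--     Callable,
--     Dict,
--     FrozenSet,
--     Iterable,
--     List,
--     Mapping,
--     MutableMapping,
--     Optional,
--     Protocol,
--     Sequence,
--     Set,
--     Tuple,
--     Union,
-- )
--
-- def _sorted_nodes(nodes: Iterable[str]) -> List[str]:
--     """Return a deterministic ordering of nodes."""
--
--     return sorted(nodes)
--
-- def all_assignments(nodes: Iterable[str], K: int) -> Iterable[Dict[str, int]]:
--     """Yield all assignments for ``nodes`` with domain size ``K``.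
--
--     Nodes are traversed in sorted order to guarantee determinism.
--     """
--
--     node_list = _sorted_nodes(nodes)
--     if not node_list:
--         yield {}
--         return
--
--     for values in itertools.product(range(K), repeat=len(node_list)):
--         assignment = {node: value for node, value in zip(node_list, values)}
--         yield assignment
-- ===== SOURCE B (Python) =====
-- def all_assignments(nodes, K):
--     """Yield all assignments for ``nodes`` with domain size ``K``.
--
--     Recursive enumeration: fix the first sorted node's value outermost and
--     recurse on the remaining nodes, extending a partial assignment.
--     """
--
--     def rec(remaining, partial):
--         if not remaining:
--             yield partial
--             return
--         node = remaining[0]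
--         for v in range(K):
--             yield from rec(remaining[1:], {**partial, node: v})
--
--     yield from rec(sorted(nodes), {})
-- ===== Notes on version B (the rewrite author's own statement) =====
-- stated objective: alternative
-- what changed: Replaced itertools.product over range(K) plus a per-tuple zip/dict comprehension by a direct recursive enumeration that extends a partial assignment node by node, yielding at the base case.
import Mathlib
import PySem

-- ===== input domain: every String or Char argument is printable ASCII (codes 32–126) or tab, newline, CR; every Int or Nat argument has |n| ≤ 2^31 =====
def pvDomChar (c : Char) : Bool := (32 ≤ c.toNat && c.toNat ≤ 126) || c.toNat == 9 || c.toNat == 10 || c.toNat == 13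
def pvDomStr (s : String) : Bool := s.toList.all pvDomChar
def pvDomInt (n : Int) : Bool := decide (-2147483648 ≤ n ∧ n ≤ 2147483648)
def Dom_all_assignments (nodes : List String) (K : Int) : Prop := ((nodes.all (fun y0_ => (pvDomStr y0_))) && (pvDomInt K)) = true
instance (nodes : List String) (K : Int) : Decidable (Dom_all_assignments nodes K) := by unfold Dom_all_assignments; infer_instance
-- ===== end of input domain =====

-- B replaces itertools.product + per-tuple dict comprehension by a direct recursion over
-- the sorted node list extending a partial assignment (objective: alternative decomposition).
-- Both Pythons are generators; the equivalence is about the full yielded sequence (as a list).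

-- ===== PORT A =====
-- itertools.product(range(K), repeat=n): first component varies slowest
def pvProdRep (K : Int) : Nat → List (List Int)
  | 0 => [[]]
  | n + 1 => (PySem.List.pyRange 0 K 1).flatMap (fun v => (pvProdRep K n).map (v :: ·))

def all_assignments (nodes : List String) (K : Int) : List (List (String × Int)) :=
  let node_list := PySem.List.sorted nodes (fun x => x)
  if node_list = [] then [[]]
  else
    (pvProdRep K node_list.length).map (fun values =>
      -- dict comprehension {node: value for node, value in zip(node_list, values)}
      ((node_list.zip values).foldl (fun d p => d.insert p.1 p.2)
        (PySem.Dict.empty : PySem.Dict String Int)).items)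

-- ===== PORT B =====
def pvRec (K : Int) : List String → PySem.Dict String Int → List (List (String × Int))
  | [], partial_ => [partial_.items]
  | node :: rest, partial_ =>
      (PySem.List.pyRange 0 K 1).flatMap (fun v => pvRec K rest (partial_.insert node v))

def all_assignments_alt (nodes : List String) (K : Int) : List (List (String × Int)) :=
  pvRec K (PySem.List.sorted nodes (fun x => x)) PySem.Dict.empty

-- ===== PRECONDITION & SPEC =====
def Spec_all_assignments (nodes : List String) (K : Int) (out : List (List (String × Int))) : Prop := out = all_assignments_alt nodes K
instance (nodes : List String) (K : Int) (out : List (List (String × Int))) : Decidable (Spec_all_assignments nodes K out) := by unfold Spec_all_assignments; infer_instance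

-- ===== CLAIM (what is proved, stated in full; the proofs are below) =====
def Claim_equal_all_assignments : Prop := ∀ (nodes : List String) (K : Int), Dom_all_assignments nodes K → Spec_all_assignments nodes K (all_assignments nodes K)

-- ===== LEMMAS AND PROOFS =====

-- B's recursion, started from `d`, yields exactly A's per-tuple dict builds over the product.
theorem pvRec_eq (K : Int) (nl : List String) (d : PySem.Dict String Int) :
    pvRec K nl d
      = (pvProdRep K nl.length).map (fun values =>
          ((nl.zip values).foldl (fun d p => d.insert p.1 p.2) d).items) := by
  induction nl generalizing d with
  | nil => simp [pvRec, pvProdRep]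
  | cons x rest ih =>
      simp only [pvRec, pvProdRep, List.length_cons, List.map_flatMap, List.map_map]
      refine List.flatMap_congr ?_
      intro v _
      rw [ih]
      rfl

theorem all_assignments_eq_alt (nodes : List String) (K : Int) :
    all_assignments nodes K = all_assignments_alt nodes K := by
  unfold all_assignments all_assignments_alt
  by_cases h : PySem.List.sorted nodes (fun x => x) = []
  · simp [h, pvRec, PySem.Dict.empty]
  · simp only [h, if_false]
    rw [pvRec_eq]

-- ===== VERDICT (by name: the statement is the Claim_ definition above) =====
theorem all_assignments_spec : Claim_equal_all_assignments := by
  intro nodes K _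
  unfold Spec_all_assignments
  exact all_assignments_eq_alt nodes K
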